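-- pv_equiv track=rewrite | github.com/gifts1912/Project | MusicSegment/FusionRanker/JSRankerFusionVSJSRankerDifAnalysis.py | UrlLeavelFeatursSameNum
-- ===== SOURCE A (Python) =====
-- def UrlLeavelFeatursSameNum(urlFeas_fusion, urlFeas_rank):
--     sameAuthoScoreNum = 0
--     sameIntentScoreNum = 0
--     urlNum = 0
--     for url, feas_fusion in urlFeas_fusion.items():
--         if url not in urlFeas_rank:
--             continue
--         urlNum += 1
--         feas_rank = urlFeas_rank[url]
--         if feas_fusion[0] == feas_rank[0]:
--             sameAuthoScoreNum += 1
--         if feas_fusion[1] == feas_rank[1]: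
--             sameIntentScoreNum += 1
--
--     return (sameAuthoScoreNum, sameIntentScoreNum, urlNum)
-- ===== SOURCE B (Python) =====
-- def UrlLeavelFeatursSameNum(urlFeas_fusion, urlFeas_rank):
--     # Sort both item lists by url and count matches with a two-pointer merge:
--     # no dict lookups at all (urls are unique within each dict, so the merge
--     # pairs up exactly the shared urls).
--     fs = sorted(urlFeas_fusion.items(), key=lambda kv: kv[0])
--     rs = sorted(urlFeas_rank.items(), key=lambda kv: kv[0])
--     sameAuthoScoreNum = 0
--     sameIntentScoreNum = 0
--     urlNum = 0
--     i = 0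
--     j = 0
--     while i < len(fs) and j < len(rs):
--         uf, ff = fs[i]
--         ur, fr = rs[j]
--         if uf < ur:
--             i += 1
--         elif ur < uf:
--             j += 1
--         else:
--             if ff[0] == fr[0]:
--                 sameAuthoScoreNum += 1
--             if ff[1] == fr[1]:
--                 sameIntentScoreNum += 1
--             urlNum += 1
--             i += 1
--             j += 1
--     return (sameAuthoScoreNum, sameIntentScoreNum, urlNum)
-- ===== Notes on version B (the rewrite author's own statement) =====
-- stated objective: alternative
-- what changed: Replaces A's single dict-lookup loop by sorting both item lists by url and counting the matches with a two-pointer merge over the two sorted lists, so per-url dict membership tests and lookups disappear.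
import Mathlib
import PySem

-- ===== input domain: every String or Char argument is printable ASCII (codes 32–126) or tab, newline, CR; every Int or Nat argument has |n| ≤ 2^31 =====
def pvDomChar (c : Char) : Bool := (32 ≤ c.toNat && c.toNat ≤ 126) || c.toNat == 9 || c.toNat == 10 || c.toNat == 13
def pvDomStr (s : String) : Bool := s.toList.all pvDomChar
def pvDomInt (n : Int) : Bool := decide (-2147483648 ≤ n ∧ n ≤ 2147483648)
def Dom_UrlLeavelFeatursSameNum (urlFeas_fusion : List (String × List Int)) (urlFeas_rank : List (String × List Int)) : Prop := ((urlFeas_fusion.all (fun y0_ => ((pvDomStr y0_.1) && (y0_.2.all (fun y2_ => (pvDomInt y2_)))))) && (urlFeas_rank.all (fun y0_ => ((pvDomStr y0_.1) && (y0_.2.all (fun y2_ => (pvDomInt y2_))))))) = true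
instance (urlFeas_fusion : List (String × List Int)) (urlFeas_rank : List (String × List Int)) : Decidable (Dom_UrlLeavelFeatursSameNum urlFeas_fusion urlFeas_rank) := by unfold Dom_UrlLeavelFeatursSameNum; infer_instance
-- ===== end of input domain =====

-- B sorts both item lists by url and counts the matches with a two-pointer
-- merge, removing A's per-url dict lookups (alternative algorithm, same task).

-- ===== PORT A =====
-- one iteration of A's for-loop: skip if url not in urlFeas_rank, else bump the three counters
def pvStepA (urlFeas_rank : List (String × List Int)) (acc : Int × Int × Int) (p : String × List Int) : Int × Int × Int :=
  match (PySem.Dict.mk urlFeas_rank).get? p.1 with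
  | none => acc
  | some feas_rank =>
      (acc.1 + (if PySem.List.pyGet? p.2 0 = PySem.List.pyGet? feas_rank 0 then 1 else 0),
       acc.2.1 + (if PySem.List.pyGet? p.2 1 = PySem.List.pyGet? feas_rank 1 then 1 else 0),
       acc.2.2 + 1)

def UrlLeavelFeatursSameNum (urlFeas_fusion : List (String × List Int)) (urlFeas_rank : List (String × List Int)) : Int × Int × Int :=
  urlFeas_fusion.foldl (pvStepA urlFeas_rank) (0, 0, 0)

-- ===== PORT B =====
-- Source B's while loop: advancing i / j corresponds to consuming the head of fs / rs
def pvMergeB (acc : Int × Int × Int) : List (String × List Int) → List (String × List Int) → Int × Int × Int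
  | [], _ => acc
  | _ :: _, [] => acc
  | (uf, ff) :: fs, (ur, fr) :: rs =>
      if uf < ur then pvMergeB acc fs ((ur, fr) :: rs)
      else if ur < uf then pvMergeB acc ((uf, ff) :: fs) rs
      else pvMergeB
        (acc.1 + (if PySem.List.pyGet? ff 0 = PySem.List.pyGet? fr 0 then 1 else 0),
         acc.2.1 + (if PySem.List.pyGet? ff 1 = PySem.List.pyGet? fr 1 then 1 else 0),
         acc.2.2 + 1) fs rs
  termination_by fs rs => fs.length + rs.length

def UrlLeavelFeatursSameNum_alt (urlFeas_fusion : List (String × List Int)) (urlFeas_rank : List (String × List Int)) : Int × Int × Int :=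
  pvMergeB (0, 0, 0)
    (PySem.List.sorted urlFeas_fusion (fun kv => kv.1) false)
    (PySem.List.sorted urlFeas_rank (fun kv => kv.1) false)

-- ===== PRECONDITION & SPEC =====
-- Pre_ excludes exactly the inputs where Python A raises IndexError (a shared url whose
-- feature list on either side has fewer than 2 entries) and assoc lists with duplicate
-- keys, which do not represent a Python dict (dict keys are unique).
def Pre_UrlLeavelFeatursSameNum (urlFeas_fusion : List (String × List Int)) (urlFeas_rank : List (String × List Int)) : Prop :=
  (urlFeas_fusion.map Prod.fst).Nodup ∧ (urlFeas_rank.map Prod.fst).Nodup ∧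
  ∀ p ∈ urlFeas_fusion, ∀ fr ∈ (PySem.Dict.mk urlFeas_rank).get? p.1, 2 ≤ p.2.length ∧ 2 ≤ fr.length
instance (urlFeas_fusion : List (String × List Int)) (urlFeas_rank : List (String × List Int)) : Decidable (Pre_UrlLeavelFeatursSameNum urlFeas_fusion urlFeas_rank) := by unfold Pre_UrlLeavelFeatursSameNum; infer_instance

def pvWitness_UrlLeavelFeatursSameNum : (List (String × List Int)) × (List (String × List Int)) :=
  ([("a", [1, 2]), ("b", [3, 4])], [("a", [1, 9]), ("c", [0, 0])])

def Spec_UrlLeavelFeatursSameNum (urlFeas_fusion : List (String × List Int)) (urlFeas_rank : List (String × List Int)) (out : Int × Int × Int) : Prop := out = UrlLeavelFeatursSameNum_alt urlFeas_fusion urlFeas_rank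
instance (urlFeas_fusion : List (String × List Int)) (urlFeas_rank : List (String × List Int)) (out : Int × Int × Int) : Decidable (Spec_UrlLeavelFeatursSameNum urlFeas_fusion urlFeas_rank out) := by unfold Spec_UrlLeavelFeatursSameNum; infer_instance

-- ===== CLAIM (what is proved, stated in full; the proofs are below) =====
def Claim_equal_UrlLeavelFeatursSameNum : Prop := ∀ (urlFeas_fusion : List (String × List Int)) (urlFeas_rank : List (String × List Int)), Dom_UrlLeavelFeatursSameNum urlFeas_fusion urlFeas_rank → Pre_UrlLeavelFeatursSameNum urlFeas_fusion urlFeas_rank → Spec_UrlLeavelFeatursSameNum urlFeas_fusion urlFeas_rank (UrlLeavelFeatursSameNum urlFeas_fusion urlFeas_rank)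

-- ===== LEMMAS AND PROOFS =====

-- first-match lookup in the rank side, what both A's 'urlFeas_rank[url]' and the proofs use
def pvLook (r : List (String × List Int)) (k : String) : Option (List Int) := (PySem.Dict.mk r).get? k

def pvMatch (r : List (String × List Int)) (i : Int) (p : String × List Int) : Bool :=
  match pvLook r p.1 with
  | none => false
  | some fr => PySem.List.pyGet? p.2 i == PySem.List.pyGet? fr i

-- canonical middle form: counts over the shared urls, expressed by lookups
def pvCommon (f r : List (String × List Int)) : List (String × List Int) :=
  f.filter (fun p => (pvLook r p.1).isSome)

def pvM (f r : List (String × List Int)) : Int × Int × Int :=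
  (((pvCommon f r).countP (pvMatch r 0) : Int),
   ((pvCommon f r).countP (pvMatch r 1) : Int),
   ((pvCommon f r).length : Int))

theorem pvFold_eq (r : List (String × List Int)) :
    ∀ (f : List (String × List Int)) (acc : Int × Int × Int),
      f.foldl (pvStepA r) acc = (acc.1 + (pvM f r).1, acc.2.1 + (pvM f r).2.1, acc.2.2 + (pvM f r).2.2) := by
  intro f
  induction f with
  | nil => intro acc; simp [pvM, pvCommon]
  | cons p t ih =>
      intro acc
      cases h : pvLook r p.1 with
      | none =>
          have hs : pvStepA r acc p = acc := by
            simp only [pvStepA]; rw [show (PySem.Dict.mk r).get? p.1 = pvLook r p.1 from rfl, h]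
          have hM : pvM (p :: t) r = pvM t r := by
            simp [pvM, pvCommon, h]
          simp only [List.foldl_cons, hs, hM, ih]
      | some fr =>
          have hs : pvStepA r acc p =
              (acc.1 + (if PySem.List.pyGet? p.2 0 = PySem.List.pyGet? fr 0 then 1 else 0),
               acc.2.1 + (if PySem.List.pyGet? p.2 1 = PySem.List.pyGet? fr 1 then 1 else 0),
               acc.2.2 + 1) := by
            simp only [pvStepA]; rw [show (PySem.Dict.mk r).get? p.1 = pvLook r p.1 from rfl, h]
          have hm : ∀ i, pvMatch r i p = decide (PySem.List.pyGet? p.2 i = PySem.List.pyGet? fr i) := by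
            intro i; simp only [pvMatch, h]; rw [Bool.eq_iff_iff]; simp
          have hM0 : pvCommon (p :: t) r = p :: pvCommon t r := by
            simp [pvCommon, h]
          simp only [List.foldl_cons, hs, ih, pvM, hM0, List.countP_cons, List.length_cons, hm]
          refine Prod.ext ?_ (Prod.ext ?_ ?_)
          · by_cases h0 : PySem.List.pyGet? p.2 0 = PySem.List.pyGet? fr 0 <;>
              simp [h0] <;> push_cast <;> ring
          · by_cases h1 : PySem.List.pyGet? p.2 1 = PySem.List.pyGet? fr 1 <;>
              simp [h1] <;> push_cast <;> ring
          · simp; push_cast; ring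

theorem pvLook_head_filter (r : List (String × List Int)) (k : String) :
    pvLook r k = ((r.filter (fun p => p.1 == k)).head?).map Prod.snd := by
  induction r with
  | nil => rfl
  | cons p t ih =>
      obtain ⟨u, v⟩ := p
      rw [show pvLook ((u, v) :: t) k = (PySem.Dict.mk ((u, v) :: t)).get? k from rfl,
        PySem.Dict.get?_mk_cons, List.filter_cons]
      by_cases hu : u = k
      · simp [hu]
      · simpa [hu, pvLook, PySem.Dict.mk] using ih

theorem pvLook_perm (r r' : List (String × List Int)) (hperm : r.Perm r')
    (hnd : (r.map Prod.fst).Nodup) (k : String) : pvLook r k = pvLook r' k := by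
  have hpw : r.Pairwise (fun a b => a.1 ≠ b.1) := (List.pairwise_map).mp hnd
  have hlen : (r.filter (fun p => p.1 == k)).length ≤ 1 := by
    cases hfil : r.filter (fun p => p.1 == k) with
    | nil => simp
    | cons a l =>
        cases l with
        | nil => simp
        | cons b l' =>
            exfalso
            have hpf : (r.filter (fun p => p.1 == k)).Pairwise (fun a b => a.1 ≠ b.1) :=
              hpw.sublist (List.filter_sublist (l := r))
            rw [hfil] at hpf
            have hab : a.1 ≠ b.1 := (List.pairwise_cons.mp hpf).1 b (by simp)
            have ha : a ∈ r.filter (fun p => p.1 == k) := by rw [hfil]; simp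
            have hb : b ∈ r.filter (fun p => p.1 == k) := by rw [hfil]; simp
            have ha' := List.of_mem_filter ha
            have hb' := List.of_mem_filter hb
            simp only [beq_iff_eq] at ha' hb'
            exact hab (ha'.trans hb'.symm)
  have hfeq : r.filter (fun p => p.1 == k) = r'.filter (fun p => p.1 == k) := by
    have hp := hperm.filter (fun p => p.1 == k)
    cases hfil : r.filter (fun p => p.1 == k) with
    | nil => rw [hfil] at hp; exact (hp.nil_eq).symm ▸ rfl
    | cons a l =>
        rw [hfil] at hp hlen
        cases l with
        | nil => exact (List.perm_singleton.mp hp.symm).symm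
        | cons b l' => simp at hlen
  rw [pvLook_head_filter, pvLook_head_filter, hfeq]

theorem pvLook_cons_ne (u : String) (v : List Int) (r : List (String × List Int)) (k : String)
    (h : ¬ u = k) : pvLook ((u, v) :: r) k = pvLook r k := by
  rw [show pvLook ((u, v) :: r) k = (PySem.Dict.mk ((u, v) :: r)).get? k from rfl,
    PySem.Dict.get?_mk_cons]
  simp only [beq_iff_eq, if_neg h]
  rfl

theorem pvLook_cons_self (u : String) (v : List Int) (r : List (String × List Int)) :
    pvLook ((u, v) :: r) u = some v := by
  rw [show pvLook ((u, v) :: r) u = (PySem.Dict.mk ((u, v) :: r)).get? u from rfl,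
    PySem.Dict.get?_mk_cons]
  simp

theorem pvLook_eq_none (r : List (String × List Int)) (k : String)
    (h : ∀ q ∈ r, q.1 ≠ k) : pvLook r k = none := by
  rw [pvLook_head_filter]
  have hfil : r.filter (fun p => p.1 == k) = [] :=
    List.filter_eq_nil_iff.mpr (fun a ha => by simp [h a ha])
  rw [hfil]; rfl

theorem pvM_nil_right (f : List (String × List Int)) : pvM f [] = (0, 0, 0) := by
  have hl : ∀ p ∈ f, pvLook [] p.1 = none := fun p _ => pvLook_eq_none [] p.1 (by simp)
  have hc : pvCommon f [] = [] := by
    unfold pvCommon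
    exact List.filter_eq_nil_iff.mpr (fun a ha => by simp [hl a ha])
  simp [pvM, hc]

theorem pvM_drop_fusion (u : String) (ff : List Int) (fs r : List (String × List Int))
    (h : pvLook r u = none) : pvM ((u, ff) :: fs) r = pvM fs r := by
  have hc : pvCommon ((u, ff) :: fs) r = pvCommon fs r := by
    unfold pvCommon; rw [List.filter_cons]; simp [h]
  simp [pvM, hc]

theorem pvM_drop_rank (f : List (String × List Int)) (u : String) (v : List Int)
    (r : List (String × List Int)) (hne : ∀ p ∈ f, p.1 ≠ u) :
    pvM f ((u, v) :: r) = pvM f r := by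
  have hl : ∀ p ∈ f, pvLook ((u, v) :: r) p.1 = pvLook r p.1 :=
    fun p hp => pvLook_cons_ne u v r p.1 (fun he => hne p hp he.symm)
  have hc : pvCommon f ((u, v) :: r) = pvCommon f r := by
    unfold pvCommon
    exact List.filter_congr (fun p hp => by rw [hl p hp])
  have hm : ∀ i, (pvCommon f r).countP (pvMatch ((u, v) :: r) i) =
      (pvCommon f r).countP (pvMatch r i) := by
    intro i
    refine List.countP_congr (fun p hp => ?_)
    have hpf : p ∈ f := (List.mem_filter.mp hp).1
    unfold pvMatch
    rw [hl p hpf]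
  simp [pvM, hc, hm]

theorem pvM_cons_cons_eq (u : String) (ff fr : List Int) (fs rs : List (String × List Int))
    (hfs : ∀ p ∈ fs, u < p.1) :
    pvM ((u, ff) :: fs) ((u, fr) :: rs) =
      ((if PySem.List.pyGet? ff 0 = PySem.List.pyGet? fr 0 then 1 else 0) + (pvM fs rs).1,
       (if PySem.List.pyGet? ff 1 = PySem.List.pyGet? fr 1 then 1 else 0) + (pvM fs rs).2.1,
       1 + (pvM fs rs).2.2) := by
  have hl : ∀ p ∈ fs, pvLook ((u, fr) :: rs) p.1 = pvLook rs p.1 :=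
    fun p hp => pvLook_cons_ne u fr rs p.1 (ne_of_lt (hfs p hp))
  have hc : pvCommon ((u, ff) :: fs) ((u, fr) :: rs) = (u, ff) :: pvCommon fs rs := by
    unfold pvCommon
    rw [List.filter_cons]
    simp only [pvLook_cons_self, Option.isSome_some, if_pos]
    congr 1
    exact List.filter_congr (fun p hp => by rw [hl p hp])
  have hm : ∀ i, (pvCommon fs rs).countP (pvMatch ((u, fr) :: rs) i) =
      (pvCommon fs rs).countP (pvMatch rs i) := by
    intro i
    refine List.countP_congr (fun p hp => ?_)
    have hpf : p ∈ fs := (List.mem_filter.mp hp).1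
    unfold pvMatch
    rw [hl p hpf]
  have hhead : ∀ i, pvMatch ((u, fr) :: rs) i (u, ff) =
      decide (PySem.List.pyGet? ff i = PySem.List.pyGet? fr i) := by
    intro i
    unfold pvMatch
    rw [show ((u, ff) : String × List Int).1 = u from rfl, pvLook_cons_self]
    rw [Bool.eq_iff_iff]; simp
  simp only [pvM, hc, List.countP_cons, List.length_cons, hm, hhead]
  refine Prod.ext ?_ (Prod.ext ?_ ?_)
  · by_cases h0 : PySem.List.pyGet? ff 0 = PySem.List.pyGet? fr 0 <;> simp [h0] <;> push_cast <;> ring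
  · by_cases h1 : PySem.List.pyGet? ff 1 = PySem.List.pyGet? fr 1 <;> simp [h1] <;> push_cast <;> ring
  · simp; push_cast; ring

theorem pvMerge_eq (fs rs : List (String × List Int))
    (hf : fs.Pairwise (fun a b => a.1 < b.1)) (hr : rs.Pairwise (fun a b => a.1 < b.1))
    (acc : Int × Int × Int) :
    pvMergeB acc fs rs = (acc.1 + (pvM fs rs).1, acc.2.1 + (pvM fs rs).2.1, acc.2.2 + (pvM fs rs).2.2) := by
  revert hf hr
  fun_induction pvMergeB acc fs rs with
  | case1 acc rs => intro hf hr; simp [pvM, pvCommon]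
  | case2 acc p fs => intro hf hr; rw [pvM_nil_right]; simp
  | case3 acc uf ff fs ur fr rs hlt ih =>
      intro hf hr
      have hnone : pvLook ((ur, fr) :: rs) uf = none := by
        refine pvLook_eq_none _ _ (fun q hq => ?_)
        rcases List.mem_cons.mp hq with h | h
        · rw [h]; exact ne_of_gt hlt
        · have : ur < q.1 := (List.pairwise_cons.mp hr).1 q h
          exact ne_of_gt (lt_trans hlt this)
      rw [ih hf.tail hr, pvM_drop_fusion uf ff fs ((ur, fr) :: rs) hnone]
  | case4 acc uf ff fs ur fr rs hnlt hlt ih =>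
      intro hf hr
      have hne : ∀ p ∈ (uf, ff) :: fs, p.1 ≠ ur := by
        intro p hp
        rcases List.mem_cons.mp hp with h | h
        · rw [h]; exact ne_of_gt hlt
        · have : uf < p.1 := (List.pairwise_cons.mp hf).1 p h
          exact ne_of_gt (lt_trans hlt this)
      rw [ih hf hr.tail, pvM_drop_rank ((uf, ff) :: fs) ur fr rs hne]
  | case5 acc uf ff fs ur fr rs hnlt hnlt' ih =>
      intro hf hr
      have heq : uf = ur := le_antisymm (not_lt.mp hnlt') (not_lt.mp hnlt)
      subst heq
      have hfs : ∀ p ∈ fs, uf < p.1 := (List.pairwise_cons.mp hf).1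
      have ih' := ih hf.tail hr.tail
      simp only [dite_eq_ite] at ih'
      rw [ih', pvM_cons_cons_eq uf ff fr fs rs hfs]
      refine Prod.ext ?_ (Prod.ext ?_ ?_) <;> simp <;> ring

-- ===== VERDICT (by name: the statement is the Claim_ definition above) =====
theorem pvPairwise_lt_sorted (l : List (String × List Int))
    (hnd : (l.map Prod.fst).Nodup) :
    (PySem.List.sorted l (fun kv => kv.1) false).Pairwise (fun a b => a.1 < b.1) := by
  have hperm : (PySem.List.sorted l (fun kv => kv.1) false).Perm l := PySem.List.sorted_perm l _ false
  have hle : (PySem.List.sorted l (fun kv => kv.1) false).Pairwise (fun a b => a.1 ≤ b.1) :=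
    PySem.List.sorted_pairwise l (fun kv => kv.1)
  have hnds : ((PySem.List.sorted l (fun kv => kv.1) false).map Prod.fst).Nodup :=
    ((hperm.map Prod.fst).nodup_iff).mpr hnd
  have hne : (PySem.List.sorted l (fun kv => kv.1) false).Pairwise (fun a b => a.1 ≠ b.1) :=
    List.pairwise_map.mp hnds
  exact (hle.and hne).imp (fun h => lt_of_le_of_ne h.1 h.2)

theorem pvM_rank_perm (f r r' : List (String × List Int)) (hperm : r.Perm r')
    (hnd : (r.map Prod.fst).Nodup) : pvM f r = pvM f r' := by
  have hL : ∀ k, pvLook r k = pvLook r' k := pvLook_perm r r' hperm hnd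
  have hMatch : ∀ i, pvMatch r i = pvMatch r' i := by
    intro i; funext p; unfold pvMatch; rw [hL p.1]
  have hCom : pvCommon f r = pvCommon f r' := by
    unfold pvCommon
    exact List.filter_congr (fun p _ => by rw [hL p.1])
  simp [pvM, hCom, hMatch]

theorem pvM_fusion_perm (f f' r : List (String × List Int)) (hperm : f.Perm f') :
    pvM f r = pvM f' r := by
  have hCom : (pvCommon f r).Perm (pvCommon f' r) := hperm.filter _
  simp [pvM, hCom.countP_eq, hCom.length_eq]

theorem UrlLeavelFeatursSameNum_spec : Claim_equal_UrlLeavelFeatursSameNum := by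
  intro f r _ hpre
  obtain ⟨hndf, hndr, -⟩ := hpre
  unfold Spec_UrlLeavelFeatursSameNum UrlLeavelFeatursSameNum UrlLeavelFeatursSameNum_alt
  have hA : f.foldl (pvStepA r) (0, 0, 0) = pvM f r := by
    rw [pvFold_eq r f (0, 0, 0)]; simp
  have hpermf : (PySem.List.sorted f (fun kv => kv.1) false).Perm f := PySem.List.sorted_perm f _ false
  have hpermr : (PySem.List.sorted r (fun kv => kv.1) false).Perm r := PySem.List.sorted_perm r _ false
  have hB : pvMergeB (0, 0, 0) (PySem.List.sorted f (fun kv => kv.1) false)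
      (PySem.List.sorted r (fun kv => kv.1) false) =
      pvM (PySem.List.sorted f (fun kv => kv.1) false) (PySem.List.sorted r (fun kv => kv.1) false) := by
    rw [pvMerge_eq _ _ (pvPairwise_lt_sorted f hndf) (pvPairwise_lt_sorted r hndr) (0, 0, 0)]
    simp
  rw [hA, hB, pvM_fusion_perm _ _ _ hpermf.symm,
    pvM_rank_perm (PySem.List.sorted f (fun kv => kv.1) false) r
      (PySem.List.sorted r (fun kv => kv.1) false) hpermr.symm hndr]
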